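-- pv_equiv track=rewrite | github.com/evgeniy-kulikov/unified-state-exam | 25/task_25_01.py | fn
-- ===== SOURCE A (Python) =====
-- def fn(n):
--     d = set()
--     for i in range(2, int(n**0.5 + 1)):
--         if not n % i:
--             d.add(i)
--             d.add(n // i)
--     if len(d) >= 3:
--         m = sorted(d)[:3]
--         return m[0] * m[1] * m[2], m[2]
-- ===== SOURCE B (Python) =====
-- def fn(n):
--     small = []
--     i = 2
--     while i * i <= n and len(small) < 3:
--         if n % i == 0:
--             small.append(i)
--         i += 1
--     if len(small) == 3:
--         a, b, c = small
--         return a * b * c, c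
--     if len(small) == 2:
--         a, b = small
--         c = n // b if b * b != n else n // a
--         return a * b * c, c
--     return None
-- ===== Notes on version B (the rewrite author's own statement) =====
-- stated objective: simpler
-- what changed: Instead of collecting every factor/cofactor pair into a set, sorting it and slicing, B scans i upward from 2 while i*i <= n collecting at most the three smallest divisors, and derives the third smallest from a cofactor (n//b, or n//a for a perfect square) when only two lie below sqrt(n).
import Mathlib
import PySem

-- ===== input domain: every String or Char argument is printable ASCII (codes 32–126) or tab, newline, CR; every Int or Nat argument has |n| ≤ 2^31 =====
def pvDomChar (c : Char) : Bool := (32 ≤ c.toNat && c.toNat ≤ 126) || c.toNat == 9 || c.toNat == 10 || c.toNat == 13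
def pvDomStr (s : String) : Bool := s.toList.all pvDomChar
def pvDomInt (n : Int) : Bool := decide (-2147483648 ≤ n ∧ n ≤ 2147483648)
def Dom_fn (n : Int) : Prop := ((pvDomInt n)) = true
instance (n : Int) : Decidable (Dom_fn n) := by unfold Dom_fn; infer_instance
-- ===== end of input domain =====

-- B replaces A's "collect factor+cofactor into a set, sort, take 3" by a direct upward scan
-- for the at-most-3 smallest divisors up to sqrt(n), deriving the third from a cofactor
-- (objective: simpler; equivalence proved for n ≥ 0 — A raises TypeError on negative n).


-- ===== PORT A =====
-- integer square root by upward scan (fuel-bounded structural recursion):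
-- pvSqrt n is the largest k ≥ 0 with k*k ≤ n; 'int(n**0.5 + 1)' in A is ported as
-- 'pvSqrt n + 1' — exact for 0 ≤ n ≤ 2^31 (the double sqrt is faithful there;
-- negative n raise TypeError in Python and are excluded by Pre_fn)
def pvSqrtLoop (n : Int) : Nat → Int → Int
  | 0, k => k
  | f + 1, k => if (k + 1) * (k + 1) ≤ n then pvSqrtLoop n f (k + 1) else k

def pvSqrt (n : Int) : Int := pvSqrtLoop n n.toNat 0

-- the loop 'for i in range(2, int(n**0.5 + 1)): if not n % i: d.add(i); d.add(n // i)'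
def pvDset (n : Int) : PySem.Set Int :=
  (PySem.List.pyRange 2 (pvSqrt n + 1) 1).foldl
    (fun d i =>
      if PySem.Int.mod n i == 0 then
        PySem.Set.add (PySem.Set.add d i) (PySem.Int.floordiv n i)
      else d)
    PySem.Set.empty

def fn (n : Int) : Option (Int × Int) :=
  let d := pvDset n
  if 3 ≤ PySem.Set.len d then
    -- m = sorted(d)[:3]; return m[0] * m[1] * m[2], m[2]
    -- (indexing via pyGetD: under the guard len d ≥ 3 the indices are in range,
    -- so the default 0 is never used)
    let m := (PySem.List.sorted d (fun x => x) false).take 3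
    some (PySem.List.pyGetD m 0 0 * PySem.List.pyGetD m 1 0 * PySem.List.pyGetD m 2 0,
      PySem.List.pyGetD m 2 0)
  else none

-- ===== PORT B =====
-- 'while i * i <= n and len(small) < 3: if n % i == 0: small.append(i); i += 1',
-- with a fuel argument (n.toNat + 1 ≥ number of iterations) making it structural
def pvScanLoop (n : Int) : Nat → Int → List Int → List Int
  | 0, _, small => small
  | f + 1, i, small =>
    if i * i ≤ n ∧ small.length < 3 then
      pvScanLoop n f (i + 1) (if PySem.Int.mod n i == 0 then small ++ [i] else small)
    else small

def fn_alt (n : Int) : Option (Int × Int) :=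
  match pvScanLoop n (n.toNat + 1) 2 [] with
  | [a, b, c] => some (a * b * c, c)
  | [a, b] =>
      let c := if b * b ≠ n then PySem.Int.floordiv n b else PySem.Int.floordiv n a
      some (a * b * c, c)
  | _ => none

-- ===== PRECONDITION & SPEC =====
-- Pre_fn excludes negative n, on which A raises TypeError (int() of the complex value (-k)**0.5)
def Pre_fn (n : Int) : Prop := 0 ≤ n
instance (n : Int) : Decidable (Pre_fn n) := by unfold Pre_fn; infer_instance
def pvWitness_fn : Int := 12

def Spec_fn (n : Int) (out : Option (Int × Int)) : Prop := out = fn_alt n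
instance (n : Int) (out : Option (Int × Int)) : Decidable (Spec_fn n out) := by unfold Spec_fn; infer_instance

-- ===== CLAIM (what is proved, stated in full; the proofs are below) =====
def Claim_equal_fn : Prop := ∀ (n : Int), Dom_fn n → Pre_fn n → Spec_fn n (fn n)

-- ===== LEMMAS AND PROOFS =====

theorem pvSqrtLoop_spec (n : Int) (f : Nat) : ∀ (k : Int), 0 ≤ k → k * k ≤ n →
    n < (k + f + 1) * (k + f + 1) →
    0 ≤ pvSqrtLoop n f k ∧ pvSqrtLoop n f k * pvSqrtLoop n f k ≤ n ∧
      n < (pvSqrtLoop n f k + 1) * (pvSqrtLoop n f k + 1) := by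
  induction f with
  | zero =>
    intro k h0 h1 h2
    refine ⟨h0, h1, ?_⟩
    simpa [pvSqrtLoop] using (by push_cast at h2; linarith : n < (k + 1) * (k + 1))
  | succ f ih =>
    intro k h0 h1 h2
    rw [pvSqrtLoop]
    by_cases hc : (k + 1) * (k + 1) ≤ n
    · rw [if_pos hc]
      exact ih (k + 1) (by omega) hc (by push_cast at h2 ⊢; linarith)
    · rw [if_neg hc]
      exact ⟨h0, h1, by omega⟩

theorem pvSqrt_spec {n : Int} (hn : 0 ≤ n) :
    0 ≤ pvSqrt n ∧ pvSqrt n * pvSqrt n ≤ n ∧ n < (pvSqrt n + 1) * (pvSqrt n + 1) := by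
  refine pvSqrtLoop_spec n n.toNat 0 le_rfl (by simpa) ?_
  have ht : ((n.toNat : Int)) = n := Int.toNat_of_nonneg hn
  rw [show (0:Int) + (n.toNat : Int) + 1 = (n.toNat : Int) + 1 by ring, ht]
  nlinarith

theorem pv_le_sqrt_iff {n i : Int} (hn : 0 ≤ n) (hi : 0 ≤ i) : i ≤ pvSqrt n ↔ i * i ≤ n := by
  obtain ⟨h0, h1, h2⟩ := pvSqrt_spec hn
  exact ⟨fun h => by nlinarith, fun h => by nlinarith⟩

theorem pv_sqrt_sq_le {n : Int} (hn : 0 ≤ n) : pvSqrt n * pvSqrt n ≤ n :=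
  (pvSqrt_spec hn).2.1

theorem pv_sqrt_nonneg {n : Int} (hn : 0 ≤ n) : 0 ≤ pvSqrt n :=
  (pvSqrt_spec hn).1

theorem pv_sqrt_add_one_le {n : Int} (hn : 2 ≤ n) : pvSqrt n + 1 ≤ n := by
  have h1 : 1 ≤ pvSqrt n := (pv_le_sqrt_iff (by omega) (by omega)).mpr (by omega)
  have h2 := pv_sqrt_sq_le (show (0:Int) ≤ n by omega)
  rcases (by omega : pvSqrt n ≤ 1 ∨ 2 ≤ pvSqrt n) with h | h
  · omega
  · nlinarith

theorem pv_sqrt_of_sq {n b : Int} (hb : 0 ≤ b) (h : b * b = n) : pvSqrt n = b := by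
  have hn : 0 ≤ n := h ▸ mul_self_nonneg b
  have h1 : b ≤ pvSqrt n := (pv_le_sqrt_iff hn hb).mpr (le_of_eq h)
  have h2 := pv_sqrt_sq_le hn
  have h0 := pv_sqrt_nonneg hn
  have h3 : pvSqrt n ≤ b := by nlinarith
  omega

theorem pv_le_of_sq_le {i n : Int} (h : i * i ≤ n) : i ≤ n := by
  rcases (by omega : i ≤ 0 ∨ 0 < i) with h0 | h0
  · exact h0.trans ((mul_self_nonneg i).trans h)
  · calc i = i * 1 := (mul_one i).symm
      _ ≤ i * i := by nlinarith
      _ ≤ n := h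

-- the list of divisors of n in [a, b), in increasing order
def pvDivs (n a b : Int) : List Int :=
  (PySem.List.pyRange a b 1).filter (fun j => PySem.Int.mod n j == 0)

theorem pv_mem_divs {n a b x : Int} : x ∈ pvDivs n a b ↔ (a ≤ x ∧ x < b) ∧ x ∣ n := by
  simp [pvDivs, List.mem_filter, PySem.List.mem_pyRange_one, PySem.Int.mod_eq_zero_iff_dvd]

theorem pv_pairwise_divs {n a b : Int} : (pvDivs n a b).Pairwise (· < ·) :=
  (PySem.List.pairwise_lt_pyRange_one a b).filter _

theorem pv_nodup_divs {n a b : Int} : (pvDivs n a b).Nodup :=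
  pv_pairwise_divs.imp ne_of_lt

-- cofactor facts for a proper divisor
theorem pv_cof {n x : Int} (hn : 0 < n) (hx : x ∣ n) (h2 : 2 ≤ x) (hlt : x < n) :
    (n / x) ∣ n ∧ 2 ≤ n / x ∧ n / x < n ∧ n / (n / x) = x ∧ (n / x) * x = n := by
  obtain ⟨y, hy⟩ := hx
  have hx0 : x ≠ 0 := by omega
  have hdiv : n / x = y := by rw [hy]; exact Int.mul_ediv_cancel_left y hx0
  have hypos : 0 < y := by nlinarith
  have hy2 : 2 ≤ y := by
    rcases (by omega : y = 1 ∨ 2 ≤ y) with h | h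
    · subst h; omega
    · exact h
  refine ⟨?_, ?_, ?_, ?_, ?_⟩
  · exact hdiv ▸ ⟨x, by linarith [hy, mul_comm x y]⟩
  · omega
  · rw [hdiv]; nlinarith
  · rw [hdiv, hy, mul_comm x y]; exact Int.mul_ediv_cancel_left x (by omega)
  · rw [hdiv]; nlinarith [hy]

theorem pv_cof_lt {n a b : Int} (hn : 0 < n) (ha : a ∣ n) (hb : b ∣ n)
    (ha2 : 2 ≤ a) (halt : a < n) (hb2 : 2 ≤ b) (hblt : b < n) (hab : a < b) :
    n / b < n / a := by
  obtain ⟨-, ha2', -, -, hamul⟩ := pv_cof hn ha ha2 halt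
  obtain ⟨-, hb2', -, -, hbmul⟩ := pv_cof hn hb hb2 hblt
  nlinarith

theorem pv_len_le_one {l : List Int} (hnd : l.Nodup) (v : Int) (h : ∀ x ∈ l, x = v) :
    l.length ≤ 1 := by
  match l with
  | [] => simp
  | [x] => simp
  | x :: y :: t =>
    exfalso
    have hx := h x (by simp)
    have hy := h y (by simp)
    simp [List.nodup_cons] at hnd
    exact hnd.1.1 (hx.trans hy.symm)

theorem pv_head_min {l : List Int} {c : Int} (hp : l.Pairwise (· < ·)) (hc : c ∈ l)
    (hmin : ∀ x ∈ l, c ≤ x) : ∃ t, l = c :: t := by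
  match l with
  | [] => exact absurd hc (by simp)
  | a :: t =>
    rcases List.mem_cons.mp hc with h | h
    · exact ⟨t, by rw [h]⟩
    · exfalso
      have := (List.pairwise_cons.mp hp).1 c h
      have := hmin a (by simp)
      omega

-- membership in A's set after the fold
theorem pv_mem_fold (n : Int) (l : List Int) (s : PySem.Set Int) (x : Int) :
    x ∈ l.foldl
      (fun d i =>
        if PySem.Int.mod n i == 0 then
          PySem.Set.add (PySem.Set.add d i) (PySem.Int.floordiv n i)
        else d) s ↔
    x ∈ s ∨ ∃ i ∈ l, PySem.Int.mod n i = 0 ∧ (x = i ∨ x = PySem.Int.floordiv n i) := by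
  induction l generalizing s with
  | nil => simp
  | cons a t ih =>
    by_cases hp : PySem.Int.mod n a = 0
    · simp only [List.foldl_cons]
      rw [if_pos (by simp [hp])]
      rw [ih]
      simp [PySem.Set.mem_add, hp, or_assoc]
    · simp only [List.foldl_cons]
      rw [if_neg (by simp [hp])]
      rw [ih]
      constructor
      · rintro (h | ⟨i, hi, h1, h2⟩)
        · exact Or.inl h
        · exact Or.inr ⟨i, List.mem_cons_of_mem _ hi, h1, h2⟩
      · rintro (h | ⟨i, hi, h1, h2⟩)
        · exact Or.inl h
        · rcases List.mem_cons.mp hi with rfl | hi'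
          · exact absurd h1 hp
          · exact Or.inr ⟨i, hi', h1, h2⟩

theorem pv_nodup_fold (n : Int) (l : List Int) (s : PySem.Set Int) (hs : s.Nodup) :
    (l.foldl
      (fun d i =>
        if PySem.Int.mod n i == 0 then
          PySem.Set.add (PySem.Set.add d i) (PySem.Int.floordiv n i)
        else d) s).Nodup := by
  induction l generalizing s with
  | nil => exact hs
  | cons a t ih =>
    simp only [List.foldl_cons]
    split
    · exact ih _ (PySem.Set.nodup_add _ _ (PySem.Set.nodup_add _ _ hs))
    · exact ih _ hs

-- characterization of A's set: exactly the divisors of n in [2, n)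
theorem pv_dset_char {n : Int} (hn : 2 ≤ n) (x : Int) :
    x ∈ pvDset n ↔ (2 ≤ x ∧ x < n) ∧ x ∣ n := by
  have hn0 : (0:Int) < n := by omega
  have hK0 : 0 ≤ pvSqrt n := pv_sqrt_nonneg (by omega)
  rw [pvDset, pv_mem_fold]
  constructor
  · rintro (h | ⟨i, hi, hmod, hx⟩)
    · exact absurd h (by simp [PySem.Set.empty])
    · have hir := PySem.List.mem_pyRange_one.mp hi
      have hidvd : i ∣ n := (PySem.Int.mod_eq_zero_iff_dvd n i).mp hmod
      have hii : i * i ≤ n := (pv_le_sqrt_iff (by omega) (by omega)).mp (by omega)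
      have hilt : i < n := by nlinarith
      rcases hx with rfl | rfl
      · exact ⟨⟨by omega, hilt⟩, hidvd⟩
      · have hfd : PySem.Int.floordiv n i = n / i :=
          PySem.Int.floordiv_eq_ediv_of_pos (by omega)
        obtain ⟨hd1, hd2, hd3, -, -⟩ := pv_cof hn0 hidvd (by omega) hilt
        rw [hfd]
        exact ⟨⟨hd2, hd3⟩, hd1⟩
  · rintro ⟨⟨hx2, hxn⟩, hxd⟩
    right
    by_cases hxK : x ≤ pvSqrt n
    · exact ⟨x, PySem.List.mem_pyRange_one.mpr ⟨hx2, by omega⟩,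
        (PySem.Int.mod_eq_zero_iff_dvd n x).mpr hxd, Or.inl rfl⟩
    · push_neg at hxK
      obtain ⟨hd1, hd2, hd3, hd4, hd5⟩ := pv_cof hn0 hxd hx2 hxn
      have hKK : ¬ ((pvSqrt n + 1) * (pvSqrt n + 1) ≤ n) :=
        fun hc => by linarith [(pvSqrt_spec (show (0:Int) ≤ n by omega)).2.2]
      have hcK : n / x ≤ pvSqrt n := by
        by_contra hcK
        push_neg at hcK
        exact hKK (by nlinarith)
      refine ⟨n / x, PySem.List.mem_pyRange_one.mpr ⟨hd2, by omega⟩,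
        (PySem.Int.mod_eq_zero_iff_dvd n (n / x)).mpr hd1, Or.inr ?_⟩
      rw [PySem.Int.floordiv_eq_ediv_of_pos (show (0:Int) < n / x by omega), hd4]

-- B's loop computes the first three divisors of n in [2, sqrt n]
theorem pv_loop_eq {n : Int} (hn : 0 ≤ n) (f : Nat) : ∀ (i : Int) (small : List Int),
    2 ≤ i → small.length ≤ 3 → (pvSqrt n + 1 - i).toNat < f →
    pvScanLoop n f i small = (small ++ pvDivs n i (pvSqrt n + 1)).take 3 := by
  induction f with
  | zero =>
    intro i small h2 hlen hm
    omega
  | succ f ih =>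
    intro i small h2 hlen hm
    rw [pvScanLoop]
    by_cases hc : i * i ≤ n ∧ small.length < 3
    · have hiK : i ≤ pvSqrt n := (pv_le_sqrt_iff hn (by omega)).mpr hc.1
      have hstep : pvDivs n i (pvSqrt n + 1) =
          (if PySem.Int.mod n i == 0 then [i] else []) ++ pvDivs n (i + 1) (pvSqrt n + 1) := by
        simp only [pvDivs]
        rw [PySem.List.pyRange_one_cons (by omega), List.filter_cons]
        by_cases hp : PySem.Int.mod n i = 0
        · simp [hp]
        · simp [hp]
      have hm' : (pvSqrt n + 1 - (i + 1)).toNat < f := by omega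
      have hlen' : (if PySem.Int.mod n i == 0 then small ++ [i] else small).length ≤ 3 := by
        split
        · simp
          omega
        · exact hlen
      rw [if_pos hc, ih _ _ (by omega) hlen' hm', hstep]
      by_cases hp : PySem.Int.mod n i = 0
      · simp [hp]
      · simp [hp]
    · rw [if_neg hc]
      rcases (by tauto : ¬ (i * i ≤ n) ∨ ¬ (small.length < 3)) with hc2 | hc2
      · have hKi : pvSqrt n + 1 ≤ i := by
          have : ¬ (i ≤ pvSqrt n) := fun hle => hc2 ((pv_le_sqrt_iff hn (by omega)).mp hle)
          omega
        rw [pvDivs, PySem.List.pyRange_one_eq_nil (by omega)]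
        simp [List.take_of_length_le hlen]
      · have hl3 : small.length = 3 := by omega
        rw [List.take_left' hl3]

theorem pv_main {n : Int} (hn : 0 ≤ n) : fn n = fn_alt n := by
  rcases (by omega : n = 0 ∨ n = 1 ∨ 2 ≤ n) with rfl | rfl | hn2
  · decide
  · decide
  · -- main case, 2 ≤ n
    have hn0 : (0:Int) < n := by omega
    have hK0 : 0 ≤ pvSqrt n := pv_sqrt_nonneg (by omega)
    have hK1 : 1 ≤ pvSqrt n := (pv_le_sqrt_iff (by omega) (by omega)).mpr (by omega)
    have hKn : pvSqrt n + 1 ≤ n := pv_sqrt_add_one_le hn2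
    have hKK : ¬ ((pvSqrt n + 1) * (pvSqrt n + 1) ≤ n) :=
      fun hc => by linarith [(pvSqrt_spec (show (0:Int) ≤ n by omega)).2.2]
    have hsplit : pvDivs n 2 n = pvDivs n 2 (pvSqrt n + 1) ++ pvDivs n (pvSqrt n + 1) n := by
      rw [pvDivs, pvDivs, pvDivs, PySem.List.pyRange_one_append 2 (pvSqrt n + 1) n
        (by omega) (by omega), List.filter_append]
    have hnodup : (pvDset n : List Int).Nodup := pv_nodup_fold n _ _ (by simp [PySem.Set.empty])
    have hperm : (pvDivs n 2 n).Perm (pvDset n) := by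
      rw [List.perm_ext_iff_of_nodup pv_nodup_divs hnodup]
      intro a
      rw [pv_mem_divs, pv_dset_char hn2]
    have hsorted : PySem.List.sorted (pvDset n) (fun x => x) false = pvDivs n 2 n :=
      PySem.List.sorted_eq_of_perm_of_pairwise_lt _ _ _ hperm pv_pairwise_divs
    have hlen : PySem.Set.len (pvDset n) = ((pvDivs n 2 n).length : Int) := by
      simp [PySem.Set.len, hperm.length_eq]
    have hloop : pvScanLoop n (n.toNat + 1) 2 [] = (pvDivs n 2 (pvSqrt n + 1)).take 3 := by
      have hKle : pvSqrt n ≤ n := pv_le_of_sq_le (pv_sqrt_sq_le (by omega))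
      simpa using pv_loop_eq (by omega) (n.toNat + 1) 2 [] (le_refl 2) (by simp) (by omega)
    -- the cofactor of a divisor above sqrt n is a divisor at most sqrt n
    have hcofS : ∀ x ∈ pvDivs n (pvSqrt n + 1) n,
        n / x ∈ pvDivs n 2 (pvSqrt n + 1) ∧ n / (n / x) = x := by
      intro x hx
      rw [pv_mem_divs] at hx
      obtain ⟨⟨hx1, hx2⟩, hxd⟩ := hx
      obtain ⟨hd1, hd2, hd3, hd4, hd5⟩ := pv_cof hn0 hxd (by omega) hx2
      have hcK : n / x ≤ pvSqrt n := by
        by_contra hcK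
        push_neg at hcK
        exact hKK (by nlinarith)
      exact ⟨pv_mem_divs.mpr ⟨⟨hd2, by omega⟩, hd1⟩, hd4⟩
    rw [fn, fn_alt, hloop]
    simp only [hsorted, hsplit, hlen]
    rcases hSsh : pvDivs n 2 (pvSqrt n + 1) with - | ⟨a, - | ⟨b, - | ⟨c, t⟩⟩⟩
    · -- S = []: no divisor at most sqrt n, hence none above it either
      have hLnil : pvDivs n (pvSqrt n + 1) n = [] := by
        cases hLsh : pvDivs n (pvSqrt n + 1) n with
        | nil => rfl
        | cons x t' =>
          exfalso
          have := (hcofS x (by rw [hLsh]; simp)).1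
          rw [hSsh] at this
          simp at this
      rw [hLnil]
      simp
    · -- S = [a]: every divisor above sqrt n equals n / a, so there are at most two
      have hLle : (pvDivs n (pvSqrt n + 1) n).length ≤ 1 := by
        refine pv_len_le_one pv_nodup_divs (n / a) (fun x hx => ?_)
        obtain ⟨hmem, hback⟩ := hcofS x hx
        rw [hSsh] at hmem
        simp at hmem
        rw [← hback, hmem]
      rw [if_neg (by simp only [List.length_append, List.length_cons, List.length_nil]; omega)]
      simp
    · -- S = [a, b]: the third-smallest divisor is the cofactor of b (or of a for a square)
      have haS : a ∈ pvDivs n 2 (pvSqrt n + 1) := by rw [hSsh]; simp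
      have hbS : b ∈ pvDivs n 2 (pvSqrt n + 1) := by rw [hSsh]; simp
      rw [pv_mem_divs] at haS hbS
      obtain ⟨⟨ha2, haK⟩, had⟩ := haS
      obtain ⟨⟨hb2, hbK⟩, hbd⟩ := hbS
      have hab : a < b := by
        have hpw := pv_pairwise_divs (n := n) (a := 2) (b := pvSqrt n + 1)
        rw [hSsh] at hpw
        simp at hpw
        exact hpw
      have haltn : a < n := by omega
      have hbltn : b < n := by omega
      obtain ⟨hda1, hda2, hda3, hda4, hda5⟩ := pv_cof hn0 had ha2 haltn
      obtain ⟨hdb1, hdb2, hdb3, hdb4, hdb5⟩ := pv_cof hn0 hbd hb2 hbltn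
      -- the intended third element
      have hcdef : ∃ cc, (if b * b ≠ n then PySem.Int.floordiv n b else PySem.Int.floordiv n a) = cc ∧
          cc ∈ pvDivs n (pvSqrt n + 1) n ∧ ∀ x ∈ pvDivs n (pvSqrt n + 1) n, cc ≤ x := by
        by_cases hsq : b * b = n
        · refine ⟨n / a, ?_, ?_, ?_⟩
          · rw [if_neg (by simp [hsq]), PySem.Int.floordiv_eq_ediv_of_pos (by omega)]
          · -- n / a is above sqrt n = b
            have hKb : pvSqrt n = b := pv_sqrt_of_sq (by omega) hsq
            have hba : b < n / a := by nlinarith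
            exact pv_mem_divs.mpr ⟨⟨by omega, hda3⟩, hda1⟩
          · intro x hx
            obtain ⟨hmem, hback⟩ := hcofS x hx
            rw [hSsh] at hmem
            simp at hmem
            rw [pv_mem_divs] at hx
            rcases hmem with h | h
            · rw [← hback, h]
            · exfalso
              have hKb : pvSqrt n = b := pv_sqrt_of_sq (by omega) hsq
              have hnb : n / b = b := by
                rw [← hsq]
                exact Int.mul_ediv_cancel_left b (by omega)
              rw [← hback, h, hnb] at hx
              omega
        · refine ⟨n / b, ?_, ?_, ?_⟩
          · rw [if_pos (by simp [hsq]), PySem.Int.floordiv_eq_ediv_of_pos (by omega)]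
          · -- n / b is above sqrt n: otherwise it would be a third divisor in S = [a, b]
            have hKb : pvSqrt n < n / b := by
              by_contra hcb
              push_neg at hcb
              have hmem : n / b ∈ pvDivs n 2 (pvSqrt n + 1) :=
                pv_mem_divs.mpr ⟨⟨hdb2, by omega⟩, hdb1⟩
              rw [hSsh] at hmem
              simp at hmem
              rcases hmem with h | h
              · -- n / b = a, so n = a * b, contradicting sqrt n ≤ b and a < b
                rw [h] at hdb5
                have hsq2 := pv_sqrt_sq_le (show (0:Int) ≤ n by omega)
                nlinarith
              · -- n / b = b means b * b = n
                rw [h] at hdb5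
                exact hsq hdb5
            exact pv_mem_divs.mpr ⟨⟨by omega, hdb3⟩, hdb1⟩
          · intro x hx
            obtain ⟨hmem, hback⟩ := hcofS x hx
            rw [hSsh] at hmem
            simp at hmem
            rcases hmem with h | h
            · -- n / x = a : then x = n / a ≥ n / b
              rw [← hback, h]
              exact le_of_lt (pv_cof_lt hn0 had hbd ha2 haltn hb2 hbltn hab)
            · rw [← hback, h]
      obtain ⟨cc, hccdef, hccmem, hccmin⟩ := hcdef
      obtain ⟨t', hLsh⟩ := pv_head_min pv_pairwise_divs hccmem hccmin
      rw [hLsh]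
      rw [if_pos (by simp only [List.length_append, List.length_cons, List.length_nil]; omega)]
      simp [List.take_succ_cons, PySem.List.pyGetD, PySem.List.pyGet?, PySem.List.pyIdx?, hccdef]
    · -- S has at least three elements: they are the three smallest divisors
      rw [if_pos (by simp only [List.length_append, List.length_cons, List.length_nil]; omega)]
      simp [List.take_succ_cons, PySem.List.pyGetD, PySem.List.pyGet?, PySem.List.pyIdx?]

-- ===== VERDICT (by name: the statement is the Claim_ definition above) =====
theorem fn_spec : Claim_equal_fn := by
  intro n _ hpre
  unfold Spec_fn
  exact pv_main hpre
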